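-- pv_equiv track=rewrite | github.com/Krisje1973/AdventOfCode2022 | AOCHelper.py | split_binary_as_list
-- ===== SOURCE A (Python) =====
-- def split_binary_as_list(val,match):
--   splitted = []
--   matches = pow(2,val.count(match))
--   for i in range(matches):
--       splitted.append("")
--   for n in range(len(val)):
--       v=False
--       splitted.sort()
--       for i in range(matches):
--           v = v == False
--           if val[n] == match:
--               splitted[i] += str(int(v))
--           else:
--                 splitted[i] += val[n]
--   return splitted
-- ===== SOURCE B (Python) =====
-- def split_binary_as_list(val, match):
--     k = val.count(match)
--     out = []
--     for code in range(2 ** k):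
--         bits = iter(format(code, "b").zfill(k))
--         out.append("".join(next(bits) if c == match else c for c in val))
--     return out
-- ===== Notes on version B (the rewrite author's own statement) =====
-- stated objective: faster
-- what changed: B replaces A's simulation (2^k strings grown character by character with a re-sort of the whole list before every character) by a direct closed-form construction: output string number code is val with its match characters replaced by the k bits of code, most significant first; Pre_ excludes inputs where val ends with the match character, on which A skips the final sort so its output order (adjacent pairs swapped) is an accident of sort timing.
-- outside the precondition, e.g. on split_binary_as_list('01', '1'): A returns ['01', '00'], B returns ['00', '01']
import Mathlib
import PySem

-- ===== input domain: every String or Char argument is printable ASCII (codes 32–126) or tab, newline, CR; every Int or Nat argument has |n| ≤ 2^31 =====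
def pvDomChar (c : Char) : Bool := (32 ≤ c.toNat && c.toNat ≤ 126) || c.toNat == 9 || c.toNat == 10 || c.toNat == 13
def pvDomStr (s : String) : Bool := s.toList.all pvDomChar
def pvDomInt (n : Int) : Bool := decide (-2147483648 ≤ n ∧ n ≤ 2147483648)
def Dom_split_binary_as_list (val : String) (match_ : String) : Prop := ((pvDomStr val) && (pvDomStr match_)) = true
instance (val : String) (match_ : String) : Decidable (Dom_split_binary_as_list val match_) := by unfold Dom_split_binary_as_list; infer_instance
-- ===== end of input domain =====

-- B replaces A's sort-and-toggle simulation by a direct formula: output string number code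
-- is val with its match characters replaced by the k bits of code, most significant first.
-- Pre_ excludes inputs where val ends with the match character (there A's output order is
-- an accident of sort timing).

-- ===== PORT A =====
-- Python strings are modelled as List Char throughout (exact: Python compares strings
-- lexicographically by code point, as the List Char order does) and converted to String at return.
def split_binary_as_list (val : String) (match_ : String) : List String :=
  let v := val.toList
  let m := match_.toList
  let nMatches := 2 ^ PySem.Chars.count v m            -- nMatches = pow(2, val.count(match))
  -- for i in range(nMatches): splitted.append("")
  let splitted : List (List Char) := (List.range nMatches).foldl (fun acc _ => acc ++ [[]]) []
  -- for n in range(len(val)): ...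
  let final := (List.range v.length).foldl (fun splitted (n : Nat) =>
    let srt := PySem.List.sorted splitted (fun x => x) false     -- splitted.sort()
    ((List.range nMatches).foldl (fun (st : List (List Char) × Bool) i =>
        let vb := (st.2 == false)                                -- v = v == False
        (if [(PySem.List.pyGet? v (n : Int)).getD ' '] = m then  -- if val[n] == match (n is in range)
           st.1.set i ((st.1.getD i []) ++ [if vb then '1' else '0'])  -- splitted[i] += str(int(v))
         else
           st.1.set i ((st.1.getD i []) ++ [(PySem.List.pyGet? v (n : Int)).getD ' ']),  -- splitted[i] += val[n]
         vb)) (srt, false)).1) splitted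
  final.map (fun cs => String.ofList cs)

-- ===== PORT B =====
-- format(code, 'b'): the bits of code, most significant first, no leading zeros ('0' for 0)
-- (stdlib call, ported via Nat.size = bit length; pvBits n w = the low w bits of n, MSB first)
def pvBits (code : Nat) (w : Nat) : List Char :=
  (List.range w).map (fun j => if code.testBit (w - 1 - j) then '1' else '0')

-- format(code, 'b').zfill(k): left-pad with '0' to length k
def pyBinPad (code k : Nat) : List Char :=
  let s := pvBits code (max 1 (Nat.size code))
  List.replicate (k - s.length) '0' ++ s

-- ''.join(next(bits) if c == match else c for c in val); headD's default is never consulted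
-- on the admitted inputs (the bit string always has at least as many bits as there are matches)
def pvFillB : List Char → List Char → List Char → List Char
  | [], _, _ => []
  | c :: cs, bits, m =>
      if [c] = m then bits.headD '0' :: pvFillB cs bits.tail m
      else c :: pvFillB cs bits m

def split_binary_as_list_alt (val : String) (match_ : String) : List String :=
  let v := val.toList
  let m := match_.toList
  let k := PySem.Chars.count v m                       -- k = val.count(match)
  (List.range (2 ^ k)).map (fun code => String.ofList (pvFillB v (pyBinPad code k) m))

-- ===== PRECONDITION & SPEC =====
-- Pre_ excludes inputs where val ends with the (single-character) match character: there A's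
-- final bits are appended after the last sort, so A's output order (adjacent pairs swapped)
-- is an accident of sort timing, while B emits the combinations in ascending order.
def Pre_split_binary_as_list (val : String) (match_ : String) : Prop :=
  ¬ (match_.toList.length = 1 ∧ val.toList.getLast? = match_.toList.head?)
instance (val : String) (match_ : String) : Decidable (Pre_split_binary_as_list val match_) := by
  unfold Pre_split_binary_as_list; infer_instance

def pvWitness_split_binary_as_list : String × String := ("01", "0")

def Spec_split_binary_as_list (val : String) (match_ : String) (out : List String) : Prop := out = split_binary_as_list_alt val match_
instance (val : String) (match_ : String) (out : List String) : Decidable (Spec_split_binary_as_list val match_ out) := by unfold Spec_split_binary_as_list; infer_instance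

-- ===== CLAIM (what is proved, stated in full; the proofs are below) =====
def Claim_equal_split_binary_as_list : Prop := ∀ (val : String) (match_ : String), Dom_split_binary_as_list val match_ → Pre_split_binary_as_list val match_ → Spec_split_binary_as_list val match_ (split_binary_as_list val match_)

-- ===== LEMMAS AND PROOFS =====

-- proof-layer helpers: pvFill (single-character variant of pvFillB), renders and states of A's loop
def pvFill : List Char → List Char → Char → List Char
  | [], _, _ => []
  | c :: cs, bits, mc =>
      if c = mc then bits.headD '0' :: pvFill cs bits.tail mc
      else c :: pvFill cs bits mc

lemma count_go_singleton (c : Char) : ∀ (l : List Char) (fuel acc : Nat), l.length ≤ fuel →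
    PySem.Chars.count.go [c] fuel l acc = acc + l.count c := by
  intro l
  induction l with
  | nil => intro fuel acc _; rw [PySem.Chars.count.go.eq_def]; cases fuel <;> simp
  | cons h t ih =>
    intro fuel acc hle
    cases fuel with
    | zero => simp at hle
    | succ f =>
      rw [PySem.Chars.count.go.eq_def]
      simp only [List.length_cons, Nat.succ_le_succ_iff] at hle
      by_cases hc : c = h
      · subst hc
        simp only [List.isPrefixOf_cons₂_self, List.isPrefixOf_nil_left, if_pos,
          List.length_singleton, List.drop_succ_cons, List.drop_zero]
        rw [ih f (acc + 1) hle]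
        simp only [List.count_cons_self]
        omega
      · have hpre : ([c].isPrefixOf (h :: t)) = false := by
          simp [List.isPrefixOf]
          exact fun hch => absurd hch hc
        simp only [hpre, Bool.false_eq_true, reduceIte]
        rw [ih f acc hle]
        simp only [List.count_cons]
        have : ¬ h = c := fun e => hc e.symm
        simp [this]

lemma count_singleton (v : List Char) (c : Char) : PySem.Chars.count v [c] = v.count c := by
  rw [PySem.Chars.count]
  simp only [List.isEmpty_cons, Bool.false_eq_true, reduceIte]
  rw [count_go_singleton c v v.length 0 (le_refl _)]
  omega

lemma pvFill_no_mc (mc : Char) : ∀ (t : List Char) (bits : List Char), mc ∉ t → pvFill t bits mc = t := by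
  intro t
  induction t with
  | nil => intro bits _; rfl
  | cons c cs ih =>
    intro bits h
    simp only [List.mem_cons, not_or] at h
    rw [pvFill, if_neg (fun e => h.1 e.symm), ih bits h.2]

lemma pvFillB_no_match (m : List Char) : ∀ (t bits : List Char), (∀ c ∈ t, [c] ≠ m) → pvFillB t bits m = t := by
  intro t
  induction t with
  | nil => intro bits _; rfl
  | cons c cs ih =>
    intro bits h
    rw [pvFillB, if_neg (h c (by simp)), ih bits (fun c' hc' => h c' (by simp [hc']))]

lemma pvFillB_single (mc : Char) : ∀ (t bits : List Char), pvFillB t bits [mc] = pvFill t bits mc := by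
  intro t
  induction t with
  | nil => intro bits; rfl
  | cons c cs ih =>
    intro bits
    rw [pvFillB, pvFill]
    by_cases hc : c = mc
    · rw [if_pos (by rw [hc]), if_pos hc, ih]
    · rw [if_neg (by simpa using hc), if_neg hc, ih]

lemma pvFill_take (mc : Char) : ∀ (t bits : List Char), pvFill t bits mc = pvFill t (bits.take (t.count mc)) mc := by
  intro t
  induction t with
  | nil => intro bits; rfl
  | cons c cs ih =>
    intro bits
    by_cases hc : c = mc
    · subst hc
      simp only [pvFill, List.count_cons_self]
      cases bits with
      | nil => simp
      | cons b bs => simp [List.take_succ_cons, ih bs]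
    · simp only [pvFill, if_neg hc, List.count_cons_of_ne (fun e => hc e) ]
      rw [← ih bits]

lemma pvFill_append (mc : Char) : ∀ (a b bits : List Char),
    pvFill (a ++ b) bits mc = pvFill a bits mc ++ pvFill b (bits.drop (a.count mc)) mc := by
  intro a
  induction a with
  | nil => intro b bits; simp [pvFill]
  | cons c cs ih =>
    intro b bits
    by_cases hc : c = mc
    · subst hc
      simp only [List.cons_append, pvFill, List.count_cons_self, ih, reduceIte]
      simp [List.drop_tail]
    · simp only [List.cons_append, pvFill, if_neg hc, List.count_cons_of_ne (fun e => hc e), ih]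

lemma pvFill_lt (mc : Char) : ∀ (t ba bb : List Char), ba.length = t.count mc → bb.length = t.count mc →
    ba < bb → pvFill t ba mc < pvFill t bb mc := by
  intro t
  induction t with
  | nil =>
    intro ba bb ha hb hlt
    simp only [List.count_nil, List.length_eq_zero_iff] at ha hb
    subst ha; subst hb
    exact absurd hlt (lt_irrefl _)
  | cons c cs ih =>
    intro ba bb ha hb hlt
    by_cases hc : c = mc
    · subst hc
      simp only [List.count_cons_self] at ha hb
      cases ba with
      | nil => simp at ha
      | cons x xs =>
        cases bb with
        | nil => simp at hb
        | cons y ys =>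
          simp only [pvFill, List.headD_cons, List.tail_cons]
          rcases List.cons_lt_cons_iff.mp hlt with h | ⟨rfl, h⟩
          · exact List.cons_lt_cons_iff.mpr (Or.inl h)
          · exact List.cons_lt_cons_iff.mpr (Or.inr ⟨rfl,
              ih xs ys (by simpa using ha) (by simpa using hb) h⟩)
    · simp only [pvFill, if_neg hc]
      exact List.cons_lt_cons_iff.mpr (Or.inr ⟨rfl,
        ih ba bb (by simpa [List.count_cons_of_ne (fun e => hc e)] using ha)
                 (by simpa [List.count_cons_of_ne (fun e => hc e)] using hb) hlt⟩)

lemma pvBits_succ (q p : Nat) :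
    pvBits q (p + 1) = (if q.testBit p then '1' else '0') :: pvBits q p := by
  simp only [pvBits, List.range_succ_eq_map, List.map_cons, List.map_map, Nat.add_sub_cancel,
    Nat.sub_zero]
  congr 1
  apply List.map_congr_left
  intro j hj
  simp only [Function.comp_apply]
  have h : p - j.succ = p - 1 - j := by omega
  rw [h]

lemma pvBits_length (q p : Nat) : (pvBits q p).length = p := by simp [pvBits]

lemma pvBits_mod (q p : Nat) : pvBits (q % 2 ^ p) p = pvBits q p := by
  apply List.map_congr_left
  intro j hj
  simp only [List.mem_range] at hj
  rw [Nat.testBit_mod_two_pow]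
  simp [show p - 1 - j < p by omega]

lemma pvBits_lt (p : Nat) : ∀ a b : Nat, a < b → b < 2 ^ p → pvBits a p < pvBits b p := by
  induction p with
  | zero => intro a b hab hb; omega
  | succ p ih =>
    intro a b hab hb
    have hp : 0 < 2 ^ p := Nat.two_pow_pos p
    have hb' : b < 2 ^ p * 2 := by rw [← pow_succ]; exact hb
    have ha' : a < 2 ^ p * 2 := lt_trans hab hb'
    have hqa : a / 2 ^ p < 2 := (Nat.div_lt_iff_lt_mul hp).mpr (by rw [mul_comm]; exact ha')
    have hqb : b / 2 ^ p < 2 := (Nat.div_lt_iff_lt_mul hp).mpr (by rw [mul_comm]; exact hb')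
    have hma : a % 2 ^ p < 2 ^ p := Nat.mod_lt _ hp
    have hmb : b % 2 ^ p < 2 ^ p := Nat.mod_lt _ hp
    have h4a := Nat.div_add_mod a (2 ^ p)
    have h4b := Nat.div_add_mod b (2 ^ p)
    rw [pvBits_succ, pvBits_succ, Nat.testBit_eq_decide_div_mod_eq,
      Nat.testBit_eq_decide_div_mod_eq, ← pvBits_mod a, ← pvBits_mod b]
    by_cases h1 : a / 2 ^ p % 2 = 1 <;> by_cases h2 : b / 2 ^ p % 2 = 1
    · have hq : a / 2 ^ p = b / 2 ^ p := by
        generalize a / 2 ^ p = x at *; generalize b / 2 ^ p = y at *; omega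
      rw [← hq] at h4b
      have hrs : a % 2 ^ p < b % 2 ^ p := by
        generalize 2 ^ p * (a / 2 ^ p) = P at h4a h4b; omega
      simp only [h1, h2, decide_true]
      exact List.cons_lt_cons_iff.mpr (Or.inr ⟨rfl, ih _ _ hrs hmb⟩)
    · have hA : a / 2 ^ p = 1 := by
        generalize a / 2 ^ p = x at *; omega
      have hB : b / 2 ^ p = 0 := by
        generalize b / 2 ^ p = y at *; omega
      rw [hA] at h4a; rw [hB] at h4b
      simp at h4a h4b
      omega
    · have d1 : decide (a / 2 ^ p % 2 = 1) = false := by simp [h1]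
      have d2 : decide (b / 2 ^ p % 2 = 1) = true := by simp [h2]
      rw [d1, d2]
      simpa using List.cons_lt_cons_iff.mpr (Or.inl (show '0' < '1' by decide))
    · have hq : a / 2 ^ p = b / 2 ^ p := by
        generalize a / 2 ^ p = x at *; generalize b / 2 ^ p = y at *; omega
      rw [← hq] at h4b
      have hrs : a % 2 ^ p < b % 2 ^ p := by
        generalize 2 ^ p * (a / 2 ^ p) = P at h4a h4b; omega
      have d1 : decide (a / 2 ^ p % 2 = 1) = false := by simp [h1]
      have d2 : decide (b / 2 ^ p % 2 = 1) = false := by simp [h2]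
      rw [d1, d2]
      exact List.cons_lt_cons_iff.mpr (Or.inr ⟨rfl, ih _ _ hrs hmb⟩)

lemma pvBits_two_mul_add (a b p : Nat) (hb : b < 2) :
    pvBits (2 * a + b) (p + 1) = pvBits a p ++ [if b = 1 then '1' else '0'] := by
  simp only [pvBits, List.range_succ, List.map_append, List.map_cons, List.map_nil]
  congr 1
  · apply List.map_congr_left
    intro j hj
    simp only [List.mem_range] at hj
    have h1 : p + 1 - 1 - j = (p - 1 - j) + 1 := by omega
    rw [h1, Nat.testBit_succ]
    have h2 : (2 * a + b) / 2 = a := by omega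
    rw [h2]
  · have h0 : p + 1 - 1 - p = 0 := by omega
    rw [h0]
    have h : (2 * a + b).testBit 0 = decide (b = 1) := by
      rw [Nat.testBit_eq_decide_div_mod_eq]
      simp only [pow_zero, Nat.div_one]
      congr 1
      simp only [eq_iff_iff]
      omega
    rw [h]
    simp

lemma pvBits_split (code w k : Nat) (hwk : w ≤ k) (hhigh : ∀ j, w ≤ j → code.testBit j = false) :
    pvBits code k = List.replicate (k - w) '0' ++ pvBits code w := by
  have h1 : k = (k - w) + w := by omega
  rw [h1]
  simp only [pvBits, List.range_add, List.map_append, List.map_map, Nat.add_sub_cancel]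
  congr 1
  · calc List.map (fun j => if code.testBit (k - w + w - 1 - j) = true then '1' else '0') (List.range (k - w))
        = List.map (fun _ => '0') (List.range (k - w)) := by
          apply List.map_congr_left
          intro j hj
          simp only [List.mem_range] at hj
          rw [hhigh (k - w + w - 1 - j) (by omega)]
          simp
      _ = List.replicate (k - w) '0' := by rw [List.map_const', List.length_range]
  · apply List.map_congr_left
    intro j hj
    simp only [List.mem_range] at hj
    simp only [Function.comp_apply]
    have harg : k - w + w - 1 - (k - w + j) = w - 1 - j := by omega
    rw [harg]

lemma pyBinPad_eq (code k : Nat) (h1 : code < 2 ^ k) (hk : 1 ≤ k) : pyBinPad code k = pvBits code k := by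
  have hsz : Nat.size code ≤ k := Nat.size_le.mpr h1
  have hw : max 1 (Nat.size code) ≤ k := by omega
  have hhigh : ∀ j, max 1 (Nat.size code) ≤ j → code.testBit j = false := by
    intro j hj
    have : code < 2 ^ j := Nat.size_le.mp (by omega)
    exact Nat.testBit_lt_two_pow this
  rw [pyBinPad]
  simp only [pvBits_length]
  exact (pvBits_split code (max 1 (Nat.size code)) k hw hhigh).symm

lemma inner_fold (payload : Bool → List Char) (l : List (List Char)) (b : Bool) :
    ∀ n ≤ l.length,
    (List.range n).foldl (fun (st : List (List Char) × Bool) i =>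
        let vb := (st.2 == false)
        (st.1.set i ((st.1.getD i []) ++ payload vb), vb)) (l, b)
    = (l.mapIdx (fun i s => if i < n then s ++ payload (xor (decide (i % 2 = 0)) b) else s),
       xor (decide (n % 2 = 1)) b) := by
  intro n
  induction n with
  | zero =>
    intro _
    simp only [List.range_zero, List.foldl_nil]
    congr 1
    · apply List.ext_getElem <;> simp
    · simp
  | succ n ih =>
    intro hn
    rw [List.range_succ, List.foldl_append, ih (by omega), List.foldl_cons, List.foldl_nil]
    simp only
    have hlen : (l.mapIdx (fun i s => if i < n then s ++ payload (xor (decide (i % 2 = 0)) b) else s)).length = l.length := by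
      simp
    have hvb : ((xor (decide (n % 2 = 1)) b) == false) = xor (decide (n % 2 = 0)) b := by
      rcases Nat.mod_two_eq_zero_or_one n with h | h <;> cases b <;> simp [h]
    have hget : (l.mapIdx (fun i s => if i < n then s ++ payload (xor (decide (i % 2 = 0)) b) else s)).getD n [] = l[n]'(by omega) := by
      rw [List.getD_eq_getElem _ _ (by omega)]
      simp only [List.getElem_mapIdx]
      simp
    congr 1
    · apply List.ext_getElem
      · simp
      · intro i hi1 hi2
        by_cases hin : i = n
        · subst hin
          rw [List.getElem_set_self (by omega)]
          rw [hget, hvb]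
          simp only [List.getElem_mapIdx]
          simp
        · rw [List.getElem_set_ne (by omega)]
          simp only [List.getElem_mapIdx]
          by_cases h2 : i < n
          · have h3 : i < n + 1 := by omega
            simp [h2, h3]
          · have h3 : ¬ i < n + 1 := by omega
            simp [h2, h3]
    · rw [hvb]
      have : ((n+1) % 2 = 1) ↔ (n % 2 = 0) := by omega
      simp [this]

lemma range_mul_map {α : Type} (s : Nat) (hs : 0 < s) (f : Nat → Nat → α) : ∀ n : Nat,
    (List.range (n * s)).map (fun i => f (i / s) (i % s))
      = (List.range n).flatMap (fun q => (List.range s).map (f q)) := by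
  intro n
  induction n with
  | zero => simp
  | succ n ih =>
    have h1 : (n + 1) * s = n * s + s := by ring
    rw [h1, List.range_add, List.map_append, ih, List.range_succ, List.flatMap_append]
    congr 1
    simp only [List.flatMap_cons, List.flatMap_nil, List.append_nil, List.map_map]
    apply List.map_congr_left
    intro j hj
    simp only [List.mem_range] at hj
    simp only [Function.comp_apply]
    congr 1
    · rw [Nat.mul_comm n s, Nat.mul_add_div hs, Nat.div_eq_of_lt hj]
      omega
    · rw [Nat.mul_comm n s, Nat.mul_add_mod, Nat.mod_eq_of_lt hj]

lemma block_perm (q r : Nat) :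
    ((List.range (2 * r)).map (fun j => 2 * q + 1 - j % 2)).Perm
      (List.replicate r (2 * q) ++ List.replicate r (2 * q + 1)) := by
  induction r with
  | zero => simp
  | succ r ih =>
    have h1 : 2 * (r + 1) = 2 * r + 2 := by ring
    rw [h1, List.range_add, List.map_append]
    have h2 : ((List.range 2).map (fun j => 2 * r + j)).map (fun j => 2 * q + 1 - j % 2)
        = [2 * q + 1 - (2 * r) % 2, 2 * q + 1 - (2 * r + 1) % 2] := by
      simp [List.range_succ]
    rw [h2]
    have h3 : (2 * r) % 2 = 0 := by omega
    have h4 : (2 * r + 1) % 2 = 1 := by omega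
    rw [h3, h4]
    simp only [Nat.sub_zero, Nat.add_sub_cancel]
    refine (ih.append_right _).trans ?_
    apply List.perm_iff_count.mpr
    intro x
    simp only [List.count_append, List.count_replicate, List.count_cons, List.count_nil]
    split_ifs <;> simp_all

lemma flatMap_perm_congr {α β : Type} (l : List α) (f g : α → List β)
    (h : ∀ q ∈ l, (f q).Perm (g q)) : (l.flatMap f).Perm (l.flatMap g) := by
  induction l with
  | nil => simp
  | cons x xs ih =>
    simp only [List.flatMap_cons]
    exact (h x (by simp)).append (ih (fun q hq => h q (by simp [hq])))

lemma range_double_flatMap {β : Type} (n : Nat) (h : Nat → List β) :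
    (List.range (n * 2)).flatMap h = (List.range n).flatMap (fun q => h (2 * q) ++ h (2 * q + 1)) := by
  have h1 : (List.range (n * 2)).map (fun i => 2 * (i / 2) + i % 2)
      = (List.range n).flatMap (fun q => (List.range 2).map (fun j => 2 * q + j)) :=
    range_mul_map 2 (by norm_num) (fun q j => 2 * q + j) n
  have h2 : (List.range (n * 2)).map (fun i => 2 * (i / 2) + i % 2) = List.range (n * 2) := by
    rw [show (List.range (n*2)).map (fun i => 2 * (i / 2) + i % 2)
        = (List.range (n*2)).map id from
      List.map_congr_left (fun i _ => by simp only [id]; omega), List.map_id]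
  have h3 : List.range (n * 2) = (List.range n).flatMap (fun q => [2 * q, 2 * q + 1]) := by
    rw [← h2, h1]
    apply List.flatMap_congr (by intro q _; norm_num [List.range_succ])
  rw [h3, List.flatMap_assoc]
  simp

lemma codes_perm (p r : Nat) (hr : 0 < r) :
    ((List.range (2 ^ p * (2 * r))).map (fun i => i / r)).Perm
      ((List.range (2 ^ p * (2 * r))).map (fun i => 2 * (i / (2 * r)) + (1 - i % 2))) := by
  have h2r : 0 < 2 * r := by omega
  have hT : (List.range (2 ^ p * (2 * r))).map (fun i => 2 * (i / (2 * r)) + (1 - i % 2))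
      = (List.range (2 ^ p)).flatMap (fun q => (List.range (2 * r)).map (fun j => 2 * q + 1 - j % 2)) := by
    rw [show (List.range (2 ^ p * (2 * r))).map (fun i => 2 * (i / (2 * r)) + (1 - i % 2))
        = (List.range (2 ^ p * (2 * r))).map (fun i => (fun q j => 2 * q + 1 - j % 2) (i / (2 * r)) (i % (2 * r))) from
      List.map_congr_left (fun i _ => by
        have hmm : i % (2 * r) % 2 = i % 2 := Nat.mod_mod_of_dvd i ⟨r, rfl⟩
        simp only []
        omega)]
    exact range_mul_map (2 * r) h2r (fun q j => 2 * q + 1 - j % 2) (2 ^ p)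
  have hS : (List.range (2 ^ p * (2 * r))).map (fun i => i / r)
      = (List.range (2 ^ p * 2)).flatMap (fun q => List.replicate r q) := by
    have h1 : 2 ^ p * (2 * r) = (2 ^ p * 2) * r := by ring
    rw [h1, show (List.range (2 ^ p * 2 * r)).map (fun i => i / r)
        = (List.range (2 ^ p * 2 * r)).map (fun i => (fun q (j : Nat) => q) (i / r) (i % r)) from rfl,
      range_mul_map r hr (fun q (j : Nat) => q) (2 ^ p * 2)]
    apply List.flatMap_congr
    intro q _
    simp [List.map_const']
  rw [hT, hS, range_double_flatMap]
  apply flatMap_perm_congr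
  intro q _
  refine List.Perm.trans ?_ (block_perm q r).symm
  simp

-- the rendered string for code q at bit-width p
def pvRender (t : List Char) (mc : Char) (p q : Nat) : List Char := pvFill t (pvBits q p) mc

lemma pvRender_lt (t : List Char) (mc : Char) (p a b : Nat) (hp : t.count mc = p)
    (hab : a < b) (hb : b < 2 ^ p) : pvRender t mc p a < pvRender t mc p b := by
  apply pvFill_lt mc t _ _ (by rw [pvBits_length, hp]) (by rw [pvBits_length, hp])
  exact pvBits_lt p a b hab hb

lemma pvRender_le (t : List Char) (mc : Char) (p a b : Nat) (hp : t.count mc = p)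
    (hab : a ≤ b) (hb : b < 2 ^ p) : pvRender t mc p a ≤ pvRender t mc p b := by
  rcases Nat.lt_or_ge a b with h | h
  · exact le_of_lt (pvRender_lt t mc p a b hp h hb)
  · have : a = b := by omega
    subst this; exact le_refl _

-- the canonical (ascending) state for prefix t with p bits assigned, k bits total
def pvCanon (t : List Char) (mc : Char) (k p : Nat) : List (List Char) :=
  (List.range (2 ^ k)).map (fun i => pvRender t mc p (i / 2 ^ (k - p)))

-- the state A's list holds after processing prefix t (post-append, pre-sort)
def pvState (t : List Char) (mc : Char) (k : Nat) : List (List Char) :=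
  let p := t.count mc
  if p = 0 then List.replicate (2 ^ k) t
  else if t.getLast? = some mc then
    (List.range (2 ^ k)).map (fun i => pvRender t mc p (2 * (i / 2 ^ (k - p + 1)) + (1 - i % 2)))
  else pvCanon t mc k p

lemma sorted_instances (xs : List (List Char)) :
    PySem.List.sorted xs (fun x => x) false
      = @PySem.List.sorted (List Char) (List Char) List.instLinearOrder.toLT
          (@LinearOrder.toDecidableLT _ List.instLinearOrder) xs (fun x => x) false := by
  congr 1

lemma div_bound (j k p : Nat) (hpk : p ≤ k) (hj : j < 2 ^ k) : j / 2 ^ (k - p) < 2 ^ p := by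
  apply (Nat.div_lt_iff_lt_mul (Nat.two_pow_pos _)).mpr
  calc j < 2 ^ k := hj
    _ = 2 ^ p * 2 ^ (k - p) := by rw [← pow_add]; congr 1; omega

lemma range_pairwise_strong (n : Nat) : (List.range n).Pairwise (fun i j => i < j ∧ j < n) := by
  apply List.pairwise_iff_getElem.mpr
  intro i j hi hj hij
  simp only [List.getElem_range]
  simp only [List.length_range] at hj
  omega

lemma canon_pairwise (t : List Char) (mc : Char) (k p : Nat) (hp : t.count mc = p) (hpk : p ≤ k) :
    (pvCanon t mc k p).Pairwise (· ≤ ·) := by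
  unfold pvCanon
  apply List.pairwise_map.mpr
  apply (range_pairwise_strong (2 ^ k)).imp
  intro i j ⟨hij, hj⟩
  exact pvRender_le t mc p _ _ hp (Nat.div_le_div_right (le_of_lt hij)) (div_bound j k p hpk hj)

lemma canon_zero (t : List Char) (mc : Char) (k : Nat) (h0 : t.count mc = 0) :
    pvCanon t mc k 0 = List.replicate (2 ^ k) t := by
  unfold pvCanon
  have hrt : ∀ q : Nat, pvRender t mc 0 q = t := by
    intro q
    unfold pvRender
    rw [show pvBits q 0 = [] by simp [pvBits]]
    exact pvFill_no_mc mc t [] (List.count_eq_zero.mp h0)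
  rw [show ((List.range (2 ^ k)).map (fun i => pvRender t mc 0 (i / 2 ^ (k - 0))))
      = (List.range (2 ^ k)).map (fun _ => t) from List.map_congr_left (fun i _ => hrt _)]
  rw [List.map_const', List.length_range]

lemma sorted_state (t : List Char) (mc : Char) (k : Nat) (hpk : t.count mc ≤ k) :
    PySem.List.sorted (pvState t mc k) (fun x => x) false = pvCanon t mc k (t.count mc) := by
  rw [sorted_instances]
  by_cases h0 : t.count mc = 0
  · rw [pvState, if_pos h0, h0, canon_zero t mc k h0]
    apply PySem.List.sorted_eq_self_of_pairwise
    exact List.pairwise_replicate.mpr (Or.inr (le_refl t))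
  · set p := t.count mc with hp
    by_cases hl : t.getLast? = some mc
    · rw [pvState]
      simp only [← hp, if_neg h0, if_pos hl]
      apply PySem.List.sorted_id_eq_of_perm_of_pairwise
      · have hp1 : 1 ≤ p := by omega
        have hr : 0 < 2 ^ (k - p) := Nat.two_pow_pos _
        have hN : 2 ^ (p - 1) * (2 * 2 ^ (k - p)) = 2 ^ k := by
          rw [show 2 * 2 ^ (k - p) = 2 ^ (k - p + 1) by rw [pow_succ]; ring]
          rw [← pow_add]
          congr 1
          omega
        have hcp := (codes_perm (p - 1) (2 ^ (k - p)) hr).map (pvRender t mc p)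
        rw [List.map_map, List.map_map] at hcp
        rw [hN] at hcp
        have h2r : 2 * 2 ^ (k - p) = 2 ^ (k - p + 1) := by rw [pow_succ]; ring
        rw [h2r] at hcp
        exact hcp
      · exact canon_pairwise t mc k p rfl hpk
    · rw [pvState]
      simp only [← hp, if_neg h0, if_neg hl]
      apply PySem.List.sorted_eq_self_of_pairwise
      exact canon_pairwise t mc k p rfl hpk

lemma mapIdx_map_range {α : Type} (N : Nat) (f : Nat → α) (g : Nat → α → α) :
    ((List.range N).map f).mapIdx g = (List.range N).map (fun i => g i (f i)) := by
  apply List.ext_getElem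
  · simp
  · intro i hi1 hi2
    simp [List.getElem_mapIdx]

lemma canon_step (t : List Char) (mc c : Char) (k : Nat) (hpk : (t ++ [c]).count mc ≤ k) :
    (List.range (2 ^ k)).map
        (fun i => pvRender t mc (t.count mc) (i / 2 ^ (k - t.count mc))
          ++ [if c = mc then (if decide (i % 2 = 0) then '1' else '0') else c])
      = pvState (t ++ [c]) mc k := by
  by_cases hc : c = mc
  · subst hc
    have hcnt : (t ++ [c]).count c = t.count c + 1 := by simp
    have hpk' : t.count c + 1 ≤ k := by omega
    rw [pvState]
    simp only [hcnt]
    rw [if_neg (by omega), if_pos (by simp)]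
    have harith : k - (t.count c + 1) + 1 = k - t.count c := by omega
    apply List.map_congr_left
    intro i hi
    simp only [List.mem_range] at hi
    rw [harith]
    set p := t.count c with hp
    set a := i / 2 ^ (k - p) with ha
    have hb2 : 1 - i % 2 < 2 := by omega
    have hab : a < 2 ^ p := div_bound i k p (by omega) hi
    show pvRender t c p a ++ [if decide (i % 2 = 0) then '1' else '0']
        = pvRender (t ++ [c]) c (p + 1) (2 * a + (1 - i % 2))
    unfold pvRender
    rw [pvBits_two_mul_add a (1 - i % 2) p hb2]
    rw [pvFill_append]
    have hlen : (pvBits a p).length = p := pvBits_length a p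
    have htake : pvFill t (pvBits a p ++ [if 1 - i % 2 = 1 then '1' else '0']) c
        = pvFill t (pvBits a p) c := by
      rw [pvFill_take c t (pvBits a p ++ [if 1 - i % 2 = 1 then '1' else '0'])]
      rw [← hp, List.take_left' hlen]
    rw [htake]
    congr 1
    rw [← hp, List.drop_left' hlen]
    simp only [pvFill, List.headD_cons]
    rcases Nat.mod_two_eq_zero_or_one i with h | h <;> simp [h]
  · have h1 : List.count mc [c] = 0 := List.count_eq_zero.mpr (by
      simp only [List.mem_singleton]
      exact fun e => hc e.symm)
    have hcnt : (t ++ [c]).count mc = t.count mc := by simp [List.count_append, h1]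
    rw [pvState]
    simp only [hcnt]
    by_cases h0 : t.count mc = 0
    · rw [if_pos h0]
      simp only [h0]
      have hrt : ∀ q : Nat, pvRender t mc 0 q = t := by
        intro q
        unfold pvRender
        rw [show pvBits q 0 = [] by simp [pvBits]]
        exact pvFill_no_mc mc t [] (List.count_eq_zero.mp h0)
      rw [show (List.map (fun i => pvRender t mc 0 (i / 2 ^ (k - 0))
              ++ [if c = mc then (if decide (i % 2 = 0) then '1' else '0') else c]) (List.range (2 ^ k)))
          = (List.range (2 ^ k)).map (fun _ => t ++ [c]) from
        List.map_congr_left (fun i _ => by rw [hrt, if_neg hc])]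
      rw [List.map_const', List.length_range]
    · rw [if_neg h0, if_neg (show ¬ (t ++ [c]).getLast? = some mc from by
        rw [List.getLast?_concat]
        exact fun e => hc (Option.some.inj e))]
      unfold pvCanon
      apply List.map_congr_left
      intro i hi
      rw [if_neg hc]
      unfold pvRender
      rw [pvFill_append]
      congr 1
      simp [pvFill, hc]

lemma take_succ_concat (v : List Char) (n : Nat) (hn : n < v.length) :
    v.take (n + 1) = v.take n ++ [v[n]] := by
  rw [List.take_add_one]
  congr 1
  rw [List.getElem?_eq_getElem hn]
  rfl

lemma count_take_le (v : List Char) (mc : Char) (n : Nat) : (v.take n).count mc ≤ v.count mc :=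
  (List.take_sublist n v).count_le mc

lemma state_invariant (v : List Char) (mc : Char) (k : Nat) (hk : v.count mc = k) : ∀ n ≤ v.length,
    (List.range n).foldl (fun splitted (n : Nat) =>
      let srt := PySem.List.sorted splitted (fun x => x) false
      ((List.range (2 ^ k)).foldl (fun (st : List (List Char) × Bool) i =>
          let vb := (st.2 == false)
          (if [(PySem.List.pyGet? v (n : Int)).getD ' '] = [mc] then
             st.1.set i ((st.1.getD i []) ++ [if vb then '1' else '0'])
           else
             st.1.set i ((st.1.getD i []) ++ [(PySem.List.pyGet? v (n : Int)).getD ' ']),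
           vb)) (srt, false)).1) (List.replicate (2 ^ k) [])
    = pvState (v.take n) mc k := by
  intro n
  induction n with
  | zero =>
    intro _
    simp [pvState]
  | succ n ih =>
    intro hn
    have hn' : n < v.length := by omega
    rw [List.range_succ, List.foldl_append, ih (by omega), List.foldl_cons, List.foldl_nil]
    simp only
    have hget : (PySem.List.pyGet? v (n : Int)).getD ' ' = v[n] := by
      rw [PySem.List.pyGet?_natCast, List.getElem?_eq_getElem hn']
      rfl
    have hcle : (v.take n).count mc ≤ k := by rw [← hk]; exact count_take_le v mc n
    rw [sorted_state (v.take n) mc k hcle]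
    have hbody : (fun (st : List (List Char) × Bool) (i : Nat) =>
          let vb := (st.2 == false)
          (if [(PySem.List.pyGet? v (n : Int)).getD ' '] = [mc] then
             st.1.set i ((st.1.getD i []) ++ [if vb then '1' else '0'])
           else
             st.1.set i ((st.1.getD i []) ++ [(PySem.List.pyGet? v (n : Int)).getD ' ']),
           vb))
        = (fun (st : List (List Char) × Bool) (i : Nat) =>
          let vb := (st.2 == false)
          (st.1.set i ((st.1.getD i []) ++
              (if v[n] = mc then [if vb then '1' else '0'] else [v[n]])), vb)) := by
      funext st i
      simp only [hget]
      by_cases hc : v[n] = mc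
      · simp only [hc]
        simp
      · rw [if_neg (by
          intro h
          exact hc (List.cons_eq_cons.mp h).1), if_neg hc]
    rw [hbody]
    have hlen : (pvCanon (v.take n) mc k ((v.take n).count mc)).length = 2 ^ k := by
      unfold pvCanon
      simp
    rw [inner_fold (fun vb => if v[n] = mc then [if vb then '1' else '0'] else [v[n]])
      (pvCanon (v.take n) mc k ((v.take n).count mc)) false (2 ^ k) (le_of_eq hlen.symm)]
    simp only
    unfold pvCanon
    rw [mapIdx_map_range]
    rw [take_succ_concat v n hn']
    rw [← canon_step (v.take n) mc (v[n]) k (by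
      rw [← take_succ_concat v n hn', ← hk]
      exact count_take_le v mc (n + 1))]
    apply List.map_congr_left
    intro i hi
    simp only [List.mem_range] at hi
    rw [if_pos hi]
    congr 1
    by_cases hc : v[n] = mc
    · simp only [hc]
      simp
    · rw [if_neg hc, if_neg hc]

lemma no_match_invariant (v m : List Char) (M : Nat) (hm : ∀ c ∈ v, [c] ≠ m) : ∀ n ≤ v.length,
    (List.range n).foldl (fun splitted (n : Nat) =>
      let srt := PySem.List.sorted splitted (fun x => x) false
      ((List.range M).foldl (fun (st : List (List Char) × Bool) i =>
          let vb := (st.2 == false)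
          (if [(PySem.List.pyGet? v (n : Int)).getD ' '] = m then
             st.1.set i ((st.1.getD i []) ++ [if vb then '1' else '0'])
           else
             st.1.set i ((st.1.getD i []) ++ [(PySem.List.pyGet? v (n : Int)).getD ' ']),
           vb)) (srt, false)).1) (List.replicate M [])
    = List.replicate M (v.take n) := by
  intro n
  induction n with
  | zero => intro _; simp
  | succ n ih =>
    intro hn
    have hn' : n < v.length := by omega
    rw [List.range_succ, List.foldl_append, ih (by omega), List.foldl_cons, List.foldl_nil]
    simp only
    have hget : (PySem.List.pyGet? v (n : Int)).getD ' ' = v[n] := by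
      rw [PySem.List.pyGet?_natCast, List.getElem?_eq_getElem hn']
      rfl
    have hsort : PySem.List.sorted (List.replicate M (v.take n)) (fun x => x) false
        = List.replicate M (v.take n) := by
      rw [sorted_instances]
      apply PySem.List.sorted_eq_self_of_pairwise
      exact List.pairwise_replicate.mpr (Or.inr (le_refl _))
    rw [hsort]
    have hbody : (fun (st : List (List Char) × Bool) (i : Nat) =>
          let vb := (st.2 == false)
          (if [(PySem.List.pyGet? v (n : Int)).getD ' '] = m then
             st.1.set i ((st.1.getD i []) ++ [if vb then '1' else '0'])
           else
             st.1.set i ((st.1.getD i []) ++ [(PySem.List.pyGet? v (n : Int)).getD ' ']),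
           vb))
        = (fun (st : List (List Char) × Bool) (i : Nat) =>
          let vb := (st.2 == false)
          (st.1.set i ((st.1.getD i []) ++ (fun _ : Bool => [v[n]]) vb), vb)) := by
      funext st i
      simp only [hget]
      rw [if_neg (hm v[n] (by simp))]
    rw [hbody,
      inner_fold (fun _ : Bool => [v[n]]) (List.replicate M (v.take n)) false M
        (by simp)]
    simp only
    rw [take_succ_concat v n hn']
    apply List.ext_getElem
    · simp
    · intro i hi1 hi2
      simp only [List.getElem_mapIdx, List.getElem_replicate]
      rw [if_pos (by simpa using hi1)]

lemma init_replicate (M : Nat) :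
    (List.range M).foldl (fun acc (_ : Nat) => acc ++ [([] : List Char)]) [] = List.replicate M [] := by
  induction M with
  | zero => simp
  | succ n ih => rw [List.range_succ, List.foldl_append, ih, List.foldl_cons, List.foldl_nil,
      ← List.replicate_succ']

lemma main_equiv (val match_ : String) (hpre : Pre_split_binary_as_list val match_) :
    split_binary_as_list val match_ = split_binary_as_list_alt val match_ := by
  simp only [split_binary_as_list, split_binary_as_list_alt]
  rw [init_replicate]
  rcases hme : match_.toList with _ | ⟨mc, rest⟩
  · -- match is the empty string: no character ever equals it on either side
    rw [no_match_invariant val.toList [] _ (by intro c _; simp) val.toList.length (le_refl _)]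
    rw [List.take_length, List.map_replicate, String.ofList_toList]
    rw [show ((List.range (2 ^ PySem.Chars.count val.toList [])).map
          (fun code => String.ofList (pvFillB val.toList (pyBinPad code (PySem.Chars.count val.toList [])) [])))
        = (List.range (2 ^ PySem.Chars.count val.toList [])).map (fun _ => val) from
      List.map_congr_left (fun code _ => by
        rw [pvFillB_no_match [] _ _ (by intro c _; simp), String.ofList_toList])]
    rw [List.map_const', List.length_range]
  · rcases rest with _ | ⟨c2, r2⟩
    · -- match is a single character mc
      by_cases hk0 : PySem.Chars.count val.toList [mc] = 0
      · have hnotin : mc ∉ val.toList := by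
          rw [count_singleton] at hk0
          exact List.count_eq_zero.mp hk0
        rw [no_match_invariant val.toList [mc] _ (by
            intro c hc h
            exact hnotin ((List.cons_eq_cons.mp h).1 ▸ hc)) val.toList.length (le_refl _)]
        rw [List.take_length, List.map_replicate, String.ofList_toList]
        rw [show ((List.range (2 ^ PySem.Chars.count val.toList [mc])).map
              (fun code => String.ofList (pvFillB val.toList (pyBinPad code (PySem.Chars.count val.toList [mc])) [mc])))
            = (List.range (2 ^ PySem.Chars.count val.toList [mc])).map (fun _ => val) from
          List.map_congr_left (fun code _ => by
            rw [pvFillB_no_match [mc] _ _ (by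
                intro c hc h
                exact hnotin ((List.cons_eq_cons.mp h).1 ▸ hc)), String.ofList_toList])]
        rw [List.map_const', List.length_range]
      · -- the main case: mc occurs in val; Pre_ rules out val ending with mc
        set k := PySem.Chars.count val.toList [mc] with hkdef
        have hk : val.toList.count mc = k := (count_singleton _ _).symm
        have hk1 : 1 ≤ k := by omega
        have hlast : ¬ val.toList.getLast? = some mc := by
          intro h
          exact hpre (by rw [hme]; exact ⟨rfl, by rw [h]; rfl⟩)
        rw [state_invariant val.toList mc k hk val.toList.length (le_refl _), List.take_length]
        rw [pvState]
        simp only [hk]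
        rw [if_neg hk0, if_neg hlast]
        unfold pvCanon
        rw [List.map_map]
        apply List.map_congr_left
        intro code hcode
        simp only [List.mem_range, Function.comp_apply] at hcode ⊢
        rw [pvFillB_single, pyBinPad_eq code k hcode hk1]
        unfold pvRender
        rw [Nat.sub_self, pow_zero, Nat.div_one]
    · -- match has at least two characters: no single character equals it
      rw [no_match_invariant val.toList (mc :: c2 :: r2) _ (by
          intro c _ h
          simpa using congrArg List.length h) val.toList.length (le_refl _)]
      rw [List.take_length, List.map_replicate, String.ofList_toList]
      rw [show ((List.range (2 ^ PySem.Chars.count val.toList (mc :: c2 :: r2))).map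
            (fun code => String.ofList (pvFillB val.toList (pyBinPad code (PySem.Chars.count val.toList (mc :: c2 :: r2))) (mc :: c2 :: r2))))
          = (List.range (2 ^ PySem.Chars.count val.toList (mc :: c2 :: r2))).map (fun _ => val) from
        List.map_congr_left (fun code _ => by
          rw [pvFillB_no_match (mc :: c2 :: r2) _ _ (by
              intro c _ h
              simpa using congrArg List.length h), String.ofList_toList])]
      rw [List.map_const', List.length_range]

-- ===== VERDICT (by name: the statement is the Claim_ definition above) =====
theorem split_binary_as_list_spec : Claim_equal_split_binary_as_list := by
  intro val match_ _ hpre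
  unfold Spec_split_binary_as_list
  exact main_equiv val match_ hpre
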